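-- pv_equiv track=rewrite | github.com/mitchellvitez/adventofcode2017 | day09/day9.py | garbage
-- ===== SOURCE A (Python) =====
-- def garbage(s):
--     in_garbage = False
--     ignore = False
--     total = 0
--
--     for char in s:
--         if ignore:
--             ignore = False
--             continue
--
--         if in_garbage and char == '<':
--             total += 1
--         elif char == '<':
--             in_garbage = True
--         elif char == '!':
--             ignore = True
--         elif char == '>' and in_garbage:
--             in_garbage = False
--         elif in_garbage:
--             total += 1
--
--     return total
-- ===== SOURCE B (Python) =====
-- def garbage(s):
--     # Phase 1: erase every '!' together with the character following it.
--     kept = []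
--     it = iter(s)
--     for c in it:
--         if c == '!':
--             next(it, None)
--         else:
--             kept.append(c)
--     t = ''.join(kept)
--     # Phase 2: jump from garbage block to garbage block with partition.
--     total = 0
--     while True:
--         _, sep, rest = t.partition('<')
--         if not sep:
--             return total
--         inside, _, t = rest.partition('>')
--         total += len(inside)
-- ===== Notes on version B (the rewrite author's own statement) =====
-- stated objective: alternative
-- what changed: Replaces A's single-pass three-variable state machine with two passes: first erase every '!' together with its following character, then sum the lengths of the garbage blocks by repeated partition on '<' and '>'.
import Mathlib
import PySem

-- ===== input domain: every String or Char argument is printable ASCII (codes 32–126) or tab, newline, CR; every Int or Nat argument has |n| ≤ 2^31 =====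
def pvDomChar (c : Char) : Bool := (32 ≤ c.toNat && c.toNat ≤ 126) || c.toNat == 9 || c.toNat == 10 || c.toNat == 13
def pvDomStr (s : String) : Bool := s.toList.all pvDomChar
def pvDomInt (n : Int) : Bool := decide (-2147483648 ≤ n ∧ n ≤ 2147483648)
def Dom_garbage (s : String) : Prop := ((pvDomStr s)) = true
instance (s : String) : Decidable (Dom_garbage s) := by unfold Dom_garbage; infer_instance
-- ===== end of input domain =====

-- B replaces A's per-character three-variable state machine by two passes: strip the
-- '!'-escapes first, then add up the garbage-block lengths via partition-style splitting
-- (objective: alternative decomposition, same cost).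

-- ===== PORT A =====
-- one iteration of A's for-loop (state = (in_garbage, ignore, total))
def stepA (st : Bool × Bool × Int) (c : Char) : Bool × Bool × Int :=
  match st with
  | (ing, ign, tot) =>
    if ign then (ing, false, tot)
    else if ing && (c = '<') then (ing, ign, tot + 1)
    else if c = '<' then (true, ign, tot)
    else if c = '!' then (ing, true, tot)
    else if (c = '>') && ing then (false, ign, tot)
    else if ing then (ing, ign, tot + 1)
    else (ing, ign, tot)

def garbage (s : String) : Int :=
  (s.toList.foldl stepA (false, false, 0)).2.2

-- ===== PORT B =====
-- phase 1 of Source B: a '!' deletes itself and the following character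
def stripEsc : List Char → List Char
  | [] => []
  | c :: t =>
      if c = '!' then
        match t with
        | [] => []
        | _ :: t' => stripEsc t'
      else c :: stripEsc t

-- phase 2 of Source B: the while-loop with accumulator `total`; Python's t.partition(ch)
-- is exactly (takeWhile (· ≠ ch), sep-found?, (dropWhile (· ≠ ch)).drop 1), and
-- "if not sep: return total" is the isEmpty test on the dropWhile part
def countG (tot : Int) (l : List Char) : Int :=
  let rest := l.dropWhile (· ≠ '<')
  if h : rest.isEmpty then tot
  else
    let after := rest.drop 1
    countG (tot + (after.takeWhile (· ≠ '>')).length) ((after.dropWhile (· ≠ '>')).drop 1)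
termination_by l.length
decreasing_by
  have h1 : (l.dropWhile (· ≠ '<')).length ≤ l.length := l.length_dropWhile_le _
  have h2 : (l.dropWhile (· ≠ '<')).length ≠ 0 := by
    simp only [List.isEmpty_iff] at h
    exact fun hn => h (List.length_eq_zero_iff.mp hn)
  have h3 : (((l.dropWhile (· ≠ '<')).drop 1).dropWhile (· ≠ '>')).length ≤
      ((l.dropWhile (· ≠ '<')).drop 1).length := List.length_dropWhile_le ..
  have h4 : ((l.dropWhile (· ≠ '<')).drop 1).length = (l.dropWhile (· ≠ '<')).length - 1 :=
    List.length_drop ..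
  have h5 : ((((l.dropWhile (· ≠ '<')).drop 1).dropWhile (· ≠ '>')).drop 1).length =
      (((l.dropWhile (· ≠ '<')).drop 1).dropWhile (· ≠ '>')).length - 1 := List.length_drop ..
  omega

def garbage_alt (s : String) : Int := countG 0 (stripEsc s.toList)

-- ===== PRECONDITION & SPEC =====
def Spec_garbage (s : String) (out : Int) : Prop := out = garbage_alt s
instance (s : String) (out : Int) : Decidable (Spec_garbage s out) := by unfold Spec_garbage; infer_instance

-- ===== CLAIM (what is proved, stated in full; the proofs are below) =====
def Claim_equal_garbage : Prop := ∀ (s : String), Dom_garbage s → Spec_garbage s (garbage s)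

-- ===== LEMMAS AND PROOFS =====

-- "currently inside a garbage block": finish the block, then continue with countG
def countInG (tot : Int) (l : List Char) : Int :=
  countG (tot + (l.takeWhile (· ≠ '>')).length) ((l.dropWhile (· ≠ '>')).drop 1)

theorem stripEsc_cons (c : Char) (t : List Char) (hc : c ≠ '!') :
    stripEsc (c :: t) = c :: stripEsc t := by
  rw [stripEsc.eq_def]
  simp [hc]

theorem countG_nil (tot : Int) : countG tot [] = tot := by
  rw [countG.eq_def]
  simp

theorem countG_cons (tot : Int) (c : Char) (t : List Char) :
    countG tot (c :: t) = if c = '<' then countInG tot t else countG tot t := by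
  by_cases hc : c = '<'
  · subst hc
    rw [countG.eq_def]
    simp [countInG]
  · rw [countG.eq_def]
    conv_rhs => rw [countG.eq_def]
    simp [List.dropWhile_cons, hc]

theorem countInG_nil (tot : Int) : countInG tot [] = tot := by
  simp [countInG, countG_nil]

theorem countInG_cons (tot : Int) (c : Char) (t : List Char) :
    countInG tot (c :: t) = if c = '>' then countG tot t else countInG (tot + 1) t := by
  by_cases hc : c = '>'
  · simp [countInG, hc, List.dropWhile_cons, List.takeWhile_cons]
  · simp [countInG, hc, List.dropWhile_cons, List.takeWhile_cons]
    congr 1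
    push_cast
    ring

theorem loop_eq (l : List Char) : ∀ tot : Int,
    (l.foldl stepA (false, false, tot)).2.2 = countG tot (stripEsc l)
    ∧ (l.foldl stepA (true, false, tot)).2.2 = countInG tot (stripEsc l) := by
  induction l using stripEsc.induct with
  | case1 =>
      intro tot
      simp [stripEsc, countG_nil, countInG_nil]
  | case2 =>
      intro tot
      simp [stripEsc, stepA, List.foldl, countG_nil, countInG_nil]
  | case3 d t' ih =>
      intro tot
      have := ih tot
      simpa [stripEsc, stepA, List.foldl] using this
  | case4 c t hc ih =>
      intro tot
      rw [stripEsc_cons c t hc]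
      constructor
      · by_cases h1 : c = '<'
        · have e : stepA (false, false, tot) c = (true, false, tot) := by simp [stepA, h1]
          rw [List.foldl_cons, e, countG_cons, if_pos h1, (ih tot).2]
        · have e : stepA (false, false, tot) c = (false, false, tot) := by
            simp [stepA, h1, hc]
          rw [List.foldl_cons, e, countG_cons, if_neg h1, (ih tot).1]
      · by_cases h1 : c = '<'
        · have h2 : c ≠ '>' := by subst h1; decide
          have e : stepA (true, false, tot) c = (true, false, tot + 1) := by simp [stepA, h1]
          rw [List.foldl_cons, e, countInG_cons, if_neg h2, (ih (tot + 1)).2]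
        · by_cases h2 : c = '>'
          · have e : stepA (true, false, tot) c = (false, false, tot) := by
              simp [stepA, h1, h2]
            rw [List.foldl_cons, e, countInG_cons, if_pos h2, (ih tot).1]
          · have e : stepA (true, false, tot) c = (true, false, tot + 1) := by
              simp [stepA, h1, h2, hc]
            rw [List.foldl_cons, e, countInG_cons, if_neg h2, (ih (tot + 1)).2]

-- ===== VERDICT (by name: the statement is the Claim_ definition above) =====
theorem garbage_spec : Claim_equal_garbage := by
  intro s _
  unfold Spec_garbage garbage garbage_alt
  exact (loop_eq s.toList 0).1
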